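-- pv_equiv track=rewrite | github.com/Bizangel/AdventOfCode2023 | day14/day14.py | col_slide
-- ===== SOURCE A (Python) =====
-- def col_slide(rocks: str):
--     stacked_indexes = {}
--
--     stacked = 0
--     for i in range(len(rocks) - 1, -1, -1):
--         if rocks[i] == '#':
--             stacked_indexes[i] = stacked
--             stacked = 0
--         elif rocks[i] == 'O':
--             stacked += 1
--
--     # -1 will be top layer rock so to speak
--     stacked_indexes[-1] = stacked
--
--     # reconstruct.
--     rock_locs = set(stacked_indexes.keys())
--     col_construct = []
--
--     # check stacked atop rocks
--     col_construct.extend(['O'] * stacked_indexes.get(-1, 0))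
--     i = stacked_indexes.get(-1, 0)
--     while i < len(rocks):
--         if i in rock_locs:
--             col_construct.append("#")
--             # append all stucked rocks
--             col_construct.extend(['O'] * stacked_indexes[i])
--             i += stacked_indexes[i] + 1
--             continue
--         else:
--             col_construct.append(".")
--         i+= 1
--
--
--     return ''.join(col_construct)
-- ===== SOURCE B (Python) =====
-- def col_slide(rocks: str):
--     parts = []
--     o = 0
--     dots = 0
--     for ch in rocks:
--         if ch == '#':
--             parts.append('O' * o + '.' * dots + '#')
--             o = 0
--             dots = 0
--         elif ch == 'O':
--             o += 1
--         else:
--             dots += 1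
--     parts.append('O' * o + '.' * dots)
--     return ''.join(parts)
-- ===== Notes on version B (the rewrite author's own statement) =====
-- stated objective: simpler
-- what changed: B replaces A's backward index scan building a wall-index->stacked-count dict plus a jump-driven index reconstruction loop with one forward pass that keeps pending 'O' and '.' counters and flushes them at each '#' and at the end.
import Mathlib
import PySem

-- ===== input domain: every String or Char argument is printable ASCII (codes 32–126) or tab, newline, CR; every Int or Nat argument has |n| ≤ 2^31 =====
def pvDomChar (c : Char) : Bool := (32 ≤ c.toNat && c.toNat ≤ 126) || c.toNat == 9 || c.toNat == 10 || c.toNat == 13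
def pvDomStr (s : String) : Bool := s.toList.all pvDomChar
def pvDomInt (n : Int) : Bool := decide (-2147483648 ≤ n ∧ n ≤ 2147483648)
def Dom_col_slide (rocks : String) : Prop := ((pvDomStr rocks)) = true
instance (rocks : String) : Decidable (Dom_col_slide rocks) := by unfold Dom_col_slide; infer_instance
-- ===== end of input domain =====

-- B replaces A's backward scan (dict of wall index → stacked-'O' count) plus jump-driven
-- index reconstruction loop with one forward pass keeping pending 'O'/'.' counters (simpler).

-- ===== PORT A =====

-- body of A's backward for-loop: dict of '#'-index → stacked count, running 'O' count
def stepA (st : PySem.Dict Int Int × Int) (c : Char) (i : Int) : PySem.Dict Int Int × Int :=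
  if c = '#' then (st.1.insert i st.2, 0)
  else if c = 'O' then (st.1, st.2 + 1)
  else st

-- A's while-loop; fuel l.length + 1 is never exhausted, since every dict value is a
-- nonnegative count so i strictly increases each iteration (proved in recon_loop_spec).
def reconLoop (d : PySem.Dict Int Int) (rl : PySem.Set Int) (n : Int) :
    Nat → Int → List Char → List Char
  | 0, _, acc => acc
  | fuel + 1, i, acc =>
    if i < n then
      if rl.contains i then
        let s := d.getD i 0          -- key present whenever rl.contains i (rl = set of d's keys)
        reconLoop d rl n fuel (i + s + 1) (acc ++ '#' :: PySem.List.pyRepeat ['O'] s)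
      else
        reconLoop d rl n fuel (i + 1) (acc ++ ['.'])
    else acc

def col_slide (rocks : String) : String :=
  let l := rocks.toList
  let n : Int := l.length
  -- for i in range(len(rocks)-1, -1, -1): … rocks[i] … (index always in range, default unused)
  let st := (PySem.List.pyRange (n - 1) (-1) (-1)).foldl
      (fun st i => stepA st (PySem.List.pyGetD l i ' ') i) (PySem.Dict.empty, 0)
  let d := st.1.insert (-1) st.2
  let rl := PySem.Set.ofList d.keys
  let pre := PySem.List.pyRepeat ['O'] (d.getD (-1) 0)
  String.ofList (reconLoop d rl n (l.length + 1) (d.getD (-1) 0) pre)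

-- ===== PORT B =====

-- body of B's forward for-loop: (output so far, pending 'O' count, pending '.' count)
def stepB (st : List Char × Nat × Nat) (ch : Char) : List Char × Nat × Nat :=
  if ch = '#' then (st.1 ++ (List.replicate st.2.1 'O' ++ List.replicate st.2.2 '.' ++ ['#']), 0, 0)
  else if ch = 'O' then (st.1, st.2.1 + 1, st.2.2)
  else (st.1, st.2.1, st.2.2 + 1)

def col_slide_alt (rocks : String) : String :=
  let st := rocks.toList.foldl stepB ([], 0, 0)
  String.ofList (st.1 ++ (List.replicate st.2.1 'O' ++ List.replicate st.2.2 '.'))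

-- ===== PRECONDITION & SPEC =====
def Spec_col_slide (rocks : String) (out : String) : Prop := out = col_slide_alt rocks
instance (rocks : String) (out : String) : Decidable (Spec_col_slide rocks out) := by unfold Spec_col_slide; infer_instance

-- ===== CLAIM (what is proved, stated in full; the proofs are below) =====
def Claim_equal_col_slide : Prop := ∀ (rocks : String), Dom_col_slide rocks → Spec_col_slide rocks (col_slide rocks)

-- ===== LEMMAS AND PROOFS =====
def scanF (l : List Char) (k : Int) : PySem.Dict Int Int × Int :=
  (PySem.List.enumerate l k).foldr (fun p st => stepA st p.2 p.1) (PySem.Dict.empty, 0)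

theorem scanF_cons (c : Char) (t : List Char) (k : Int) :
    scanF (c :: t) k = stepA (scanF t (k + 1)) c k := by
  unfold scanF; rw [PySem.List.enumerate_cons]; rfl

theorem stepA_fst_ne (st : PySem.Dict Int Int × Int) (c : Char) (k : Int) (h : c ≠ '#') :
    (stepA st c k).1 = st.1 := by
  by_cases h2 : c = 'O' <;> simp [stepA, h, h2]

theorem scan_get_lt (l : List Char) (k i : Int) (h : i < k) : (scanF l k).1.get? i = none := by
  induction l generalizing k with
  | nil => simp [scanF, PySem.List.enumerate_nil, PySem.Dict.get?_empty]
  | cons c t ih =>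
    rw [scanF_cons]
    by_cases h1 : c = '#'
    · simp only [stepA, if_pos h1]
      rw [PySem.Dict.get?_insert_of_ne _ _ (by omega)]
      exact ih (k + 1) (by omega)
    · rw [stepA_fst_ne _ _ _ h1]
      exact ih (k + 1) (by omega)

theorem scan_snd (l : List Char) (k : Int) :
    (scanF l k).2 = ((l.takeWhile (· ≠ '#')).count 'O' : Int) := by
  induction l generalizing k with
  | nil => simp [scanF, PySem.List.enumerate_nil]
  | cons c t ih =>
    rw [scanF_cons]
    by_cases h1 : c = '#'
    · simp [stepA, h1, List.takeWhile_cons]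
    · by_cases h2 : c = 'O'
      · subst h2
        simp [stepA, h1, List.takeWhile_cons, List.count_cons, ih (k + 1)]
      · simp [stepA, h1, h2, List.takeWhile_cons, List.count_cons, ih (k + 1)]

theorem scan_get (l : List Char) (k : Int) (j : Nat) :
    (scanF l k).1.get? (k + j) =
      if h : j < l.length then
        (if l[j] = '#' then some ((((l.drop (j + 1)).takeWhile (· ≠ '#')).count 'O' : Int)) else none)
      else none := by
  induction l generalizing k j with
  | nil => simp [scanF, PySem.List.enumerate_nil, PySem.Dict.get?_empty]
  | cons c t ih =>
    rw [scanF_cons]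
    match j with
    | 0 =>
      simp only [Nat.cast_zero, add_zero, List.length_cons, List.getElem_cons_zero,
        Nat.zero_add, List.drop_succ_cons, List.drop_zero]
      by_cases h1 : c = '#'
      · simp only [stepA, if_pos h1]
        rw [PySem.Dict.get?_insert_self, scan_snd t (k + 1)]
        simp [h1]
      · rw [stepA_fst_ne _ _ _ h1, scan_get_lt t (k + 1) k (by omega)]
        simp [h1]
    | j' + 1 =>
      have hk : k + ((j' + 1 : Nat) : Int) = (k + 1) + (j' : Int) := by push_cast; ring
      rw [hk]
      have hd : (stepA (scanF t (k + 1)) c k).1.get? ((k + 1) + (j' : Int))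
          = (scanF t (k + 1)).1.get? ((k + 1) + (j' : Int)) := by
        by_cases h1 : c = '#'
        · simp only [stepA, if_pos h1]
          exact PySem.Dict.get?_insert_of_ne _ _ (by omega)
        · rw [stepA_fst_ne _ _ _ h1]
      rw [hd, ih (k + 1) j']
      simp only [List.length_cons, List.getElem_cons_succ, List.drop_succ_cons,
        Nat.add_lt_add_iff_right]

theorem conv_scan (l : List Char) :
    (PySem.List.pyRange ((l.length : Int) - 1) (-1) (-1)).foldl
      (fun st i => stepA st (PySem.List.pyGetD l i ' ') i) (PySem.Dict.empty, 0) = scanF l 0 := by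
  have h1 : PySem.List.pyRange ((l.length : Int) - 1) (-1) (-1)
      = (PySem.List.pyRange 0 (l.length : Int)).reverse := by
    have := PySem.List.pyRange_neg_one_eq_reverse ((l.length : Int) - 1) (-1)
    simpa using this
  rw [h1, List.foldl_reverse]
  unfold scanF
  rw [PySem.List.enumerate_eq_map_pyRange l ' ', List.foldr_map]
  rfl

def fillSeg (s : List Char) : List Char :=
  List.replicate (s.count 'O') 'O' ++ List.replicate (s.length - s.count 'O') '.'
def refSpec (s : List Char) : List Char :=
  if h : (s.takeWhile (· ≠ '#')).length = s.length then fillSeg (s.takeWhile (· ≠ '#'))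
  else fillSeg (s.takeWhile (· ≠ '#')) ++
    '#' :: refSpec (s.drop ((s.takeWhile (· ≠ '#')).length + 1))
termination_by s.length
decreasing_by
  have h1 : (s.takeWhile (· ≠ '#')).length ≤ s.length := by
    simpa using List.IsPrefix.length_le (List.takeWhile_prefix _)
  simp only [List.length_drop]; omega
def loopSpec (s : List Char) : List Char :=
  if h : (s.takeWhile (· ≠ '#')).length = s.length then List.replicate s.length '.'
  else
    List.replicate (s.takeWhile (· ≠ '#')).length '.' ++
      '#' :: (List.replicate (((s.drop ((s.takeWhile (· ≠ '#')).length + 1)).takeWhile (· ≠ '#')).count 'O') 'O' ++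
        loopSpec ((s.drop ((s.takeWhile (· ≠ '#')).length + 1)).drop
          (((s.drop ((s.takeWhile (· ≠ '#')).length + 1)).takeWhile (· ≠ '#')).count 'O')))
termination_by s.length
decreasing_by
  have h1 : (s.takeWhile (· ≠ '#')).length ≤ s.length := by
    simpa using List.IsPrefix.length_le (List.takeWhile_prefix _)
  simp only [List.length_drop]; omega

theorem loopSpec_nil : loopSpec [] = [] := by
  rw [loopSpec]; simp

theorem loopSpec_cons_ne (c : Char) (t : List Char) (h : c ≠ '#') :
    loopSpec (c :: t) = '.' :: loopSpec t := by
  conv_lhs => rw [loopSpec]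
  conv_rhs => rw [loopSpec]
  simp only [decide_not]
  by_cases h1 : (List.takeWhile (fun x => !decide (x = '#')) t).length = t.length
  · rw [dif_pos h1, dif_pos (by simp [List.takeWhile_cons, h, h1])]
    simp [List.replicate_succ]
  · rw [dif_neg h1, dif_neg (by simp [List.takeWhile_cons, h, h1])]
    simp [List.takeWhile_cons, h, List.replicate_succ, List.drop_succ_cons]

theorem loopSpec_cons_hash (t : List Char) :
    loopSpec ('#' :: t) =
      '#' :: (List.replicate ((t.takeWhile (· ≠ '#')).count 'O') 'O' ++
        loopSpec (t.drop ((t.takeWhile (· ≠ '#')).count 'O'))) := by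
  rw [loopSpec]
  simp [List.takeWhile_cons]

theorem loopSpec_dots (w r : List Char) (h : ∀ c ∈ w, c ≠ '#') :
    loopSpec (w ++ r) = List.replicate w.length '.' ++ loopSpec r := by
  induction w with
  | nil => simp
  | cons c t ih =>
    rw [List.cons_append, loopSpec_cons_ne c _ (h c List.mem_cons_self),
      ih (fun x hx => h x (List.mem_cons_of_mem _ hx))]
    simp [List.replicate_succ]

theorem refSpec_no_hash (u : List Char) (h : ∀ c ∈ u, c ≠ '#') : refSpec u = fillSeg u := by
  rw [refSpec]
  have huw : List.takeWhile (fun x => decide (x ≠ '#')) u = u :=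
    List.takeWhile_eq_self_iff.mpr (by simpa using h)
  simp only [huw]
  simp

theorem refSpec_split (u t : List Char) (h : ∀ c ∈ u, c ≠ '#') :
    refSpec (u ++ '#' :: t) = fillSeg u ++ '#' :: refSpec t := by
  rw [refSpec]
  have htw : List.takeWhile (fun x => decide (x ≠ '#')) (u ++ '#' :: t) = u := by
    rw [List.takeWhile_append_of_pos (by simpa using h)]
    simp [List.takeWhile_cons]
  have hlen : ¬ (u.length = (u ++ '#' :: t).length) := by simp
  simp only [htw]
  rw [dif_neg (by simpa using hlen)]
  have hdrop : List.drop (u.length + 1) (u ++ '#' :: t) = t := by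
    rw [show u.length + 1 = (u ++ ['#']).length by simp,
      show u ++ '#' :: t = (u ++ ['#']) ++ t by simp]
    simp
  rw [hdrop]

def dSpec (l : List Char) (i : Int) : Option Int :=
  if h : 0 ≤ i ∧ i.toNat < l.length then
    if l[i.toNat]'h.2 = '#' then
      some ((((l.drop (i.toNat + 1)).takeWhile (· ≠ '#')).count 'O' : Int))
    else none
  else none
theorem recon_loop_spec (l : List Char) (d : PySem.Dict Int Int) (rl : PySem.Set Int)
    (Hd : ∀ i : Int, 0 ≤ i → d.get? i = dSpec l i)
    (Hrl : ∀ i : Int, 0 ≤ i → rl.contains i = (d.get? i).isSome) :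
    ∀ (fuel : Nat) (i : Int) (acc : List Char), 0 ≤ i → ((l.length : Int) - i).toNat < fuel →
      reconLoop d rl l.length fuel i acc = acc ++ loopSpec (l.drop i.toNat) := by
  intro fuel
  induction fuel with
  | zero => omega
  | succ f ih =>
    intro i acc h0 hf
    by_cases hi : i < (l.length : Int)
    case neg =>
      have hdrop : l.drop i.toNat = [] := List.drop_eq_nil_of_le (by omega)
      simp [reconLoop, hi, hdrop, loopSpec_nil]
    case pos =>
      have hlt : i.toNat < l.length := by omega
      have hds : dSpec l i = if l[i.toNat]'hlt = '#' then
          some ((((l.drop (i.toNat + 1)).takeWhile (· ≠ '#')).count 'O' : Int)) else none := by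
        unfold dSpec
        rw [dif_pos ⟨h0, hlt⟩]
      have hcons : l.drop i.toNat = l[i.toNat] :: l.drop (i.toNat + 1) :=
        List.drop_eq_getElem_cons hlt
      by_cases hh : l[i.toNat]'hlt = '#'
      · -- '#' position
        have hget : d.get? i = some ((((l.drop (i.toNat + 1)).takeWhile (· ≠ '#')).count 'O' : Int)) := by
          rw [Hd i h0, hds, if_pos hh]
        have hcont : rl.contains i = true := by rw [Hrl i h0, hget]; rfl
        rw [reconLoop]
        rw [if_pos hi, if_pos hcont]
        have hgetD : d.getD i 0 = (((l.drop (i.toNat + 1)).takeWhile (· ≠ '#')).count 'O' : Int) := by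
          rw [PySem.Dict.getD_eq_get?_getD, hget]; rfl
        rw [hgetD]
        set c : Nat := ((l.drop (i.toNat + 1)).takeWhile (· ≠ '#')).count 'O' with hc
        have hcle : c ≤ l.length - (i.toNat + 1) := by
          have h1 := List.IsPrefix.length_le
            (List.takeWhile_prefix (l := l.drop (i.toNat + 1)) (fun x => decide (x ≠ '#')))
          have h2 : c ≤ ((l.drop (i.toNat + 1)).takeWhile (· ≠ '#')).length :=
            List.count_le_length
          simp only [List.length_drop] at h1
          omega
        have hrec := ih (i + (c : Int) + 1) (acc ++ '#' :: PySem.List.pyRepeat ['O'] (c : Int))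
          (by omega) (by omega)
        rw [hrec]
        have htn : (i + (c : Int) + 1).toNat = (i.toNat + 1) + c := by omega
        rw [htn, ← List.drop_drop, hcons, hh, loopSpec_cons_hash, PySem.List.pyRepeat_singleton]
        simp [hc, decide_not]
      · -- non-'#' position: a '.' step
        have hget : d.get? i = none := by rw [Hd i h0, hds, if_neg hh]
        have hcont : rl.contains i = false := by rw [Hrl i h0, hget]; rfl
        rw [reconLoop]
        rw [if_pos hi, if_neg (by intro hcc; rw [hcont] at hcc; cases hcc)]
        have hrec := ih (i + 1) (acc ++ ['.']) (by omega) (by omega)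
        rw [hrec]
        have htn : (i + 1).toNat = i.toNat + 1 := by omega
        rw [htn, hcons, loopSpec_cons_ne _ _ hh]
        simp [decide_not]

theorem loopSpec_no_hash (w : List Char) (h : ∀ c ∈ w, c ≠ '#') :
    loopSpec w = List.replicate w.length '.' := by
  have := loopSpec_dots w [] h
  simpa [loopSpec_nil] using this

theorem a_high_aux (n : Nat) : ∀ (u r : List Char), (∀ c ∈ u, c ≠ '#') →
    (r = [] ∨ ∃ t, r = '#' :: t) → r.length ≤ n →
    List.replicate (u.count 'O') 'O' ++ loopSpec ((u ++ r).drop (u.count 'O')) =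
      refSpec (u ++ r) := by
  induction n with
  | zero =>
    intro u r hnh hr hlen
    have hr0 : r = [] := by
      rcases hr with h | ⟨t, ht⟩
      · exact h
      · subst ht; simp at hlen
    subst hr0
    simp only [List.append_nil]
    rw [refSpec_no_hash u hnh,
      loopSpec_no_hash _ (fun c hc => hnh c (List.mem_of_mem_drop hc))]
    simp [fillSeg, List.length_drop]
  | succ m ih =>
    intro u r hnh hr hlen
    have hcle : u.count 'O' ≤ u.length := List.count_le_length
    rcases hr with h | ⟨t, ht⟩
    · subst h
      simp only [List.append_nil]
      rw [refSpec_no_hash u hnh,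
        loopSpec_no_hash _ (fun c hc => hnh c (List.mem_of_mem_drop hc))]
      simp [fillSeg, List.length_drop]
    · subst ht
      have hdrop : (u ++ '#' :: t).drop (u.count 'O') =
          u.drop (u.count 'O') ++ '#' :: t := by
        rw [List.drop_append]
        simp [Nat.sub_eq_zero_of_le hcle]
      rw [hdrop, loopSpec_dots _ _ (fun c hc => hnh c (List.mem_of_mem_drop hc)),
        loopSpec_cons_hash, refSpec_split u t hnh]
      have hnh2 : ∀ c ∈ t.takeWhile (· ≠ '#'), c ≠ '#' := by
        intro c hc
        simpa using List.mem_takeWhile_imp hc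
      have hsp : ∃ w, t.dropWhile (· ≠ '#') = w ∧ (w = [] ∨ ∃ t2, w = '#' :: t2) := by
        refine ⟨t.dropWhile (· ≠ '#'), rfl, ?_⟩
        cases hw : t.dropWhile (· ≠ '#') with
        | nil => exact Or.inl rfl
        | cons ch t2 =>
          refine Or.inr ⟨t2, ?_⟩
          have hhd := List.head_dropWhile_not (fun x => decide (x ≠ '#')) (l := t)
          rw [hw] at hhd
          have : ch = '#' := by simpa using hhd (by simp)
          rw [this]
      obtain ⟨w, hw, hwcase⟩ := hsp
      have hlen2 : w.length ≤ m := by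
        have h1 : w.length ≤ t.length := by
          rw [← hw]
          simpa using List.length_dropWhile_le (p := fun x => decide (x ≠ '#')) (l := t)
        simp at hlen
        omega
      have hIH := ih (t.takeWhile (· ≠ '#')) w hnh2 hwcase hlen2
      have htw : t.takeWhile (· ≠ '#') ++ w = t := by
        rw [← hw]; exact List.takeWhile_append_dropWhile
      rw [htw] at hIH
      rw [hIH]
      simp [fillSeg, List.length_drop]

theorem a_high (s : List Char) :
    List.replicate ((s.takeWhile (· ≠ '#')).count 'O') 'O' ++
      loopSpec (s.drop ((s.takeWhile (· ≠ '#')).count 'O')) = refSpec s := by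
  have hnh : ∀ c ∈ s.takeWhile (· ≠ '#'), c ≠ '#' := by
    intro c hc
    simpa using List.mem_takeWhile_imp hc
  have hcase : s.dropWhile (· ≠ '#') = [] ∨ ∃ t, s.dropWhile (· ≠ '#') = '#' :: t := by
    cases hw : s.dropWhile (· ≠ '#') with
    | nil => exact Or.inl rfl
    | cons ch t2 =>
      refine Or.inr ⟨t2, ?_⟩
      have hhd := List.head_dropWhile_not (fun x => decide (x ≠ '#')) (l := s)
      rw [hw] at hhd
      have : ch = '#' := by simpa using hhd (by simp)
      rw [this]
  have := a_high_aux (s.dropWhile (· ≠ '#')).length (s.takeWhile (· ≠ '#'))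
    (s.dropWhile (· ≠ '#')) hnh hcase le_rfl
  rwa [List.takeWhile_append_dropWhile] at this

theorem b_fold_seg (u : List Char) (h : ∀ c ∈ u, c ≠ '#') : ∀ (acc : List Char) (o dts : Nat),
    u.foldl stepB (acc, o, dts) = (acc, o + u.count 'O', dts + (u.length - u.count 'O')) := by
  induction u with
  | nil => intro acc o dts; simp
  | cons x t ih =>
    intro acc o dts
    have hx : x ≠ '#' := h x List.mem_cons_self
    have hcle : t.count 'O' ≤ t.length := List.count_le_length
    by_cases hO : x = 'O'
    · subst hO
      rw [List.foldl_cons, show stepB (acc, o, dts) 'O' = (acc, o + 1, dts) from by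
        simp [stepB, hx]]
      rw [ih (fun c hc => h c (List.mem_cons_of_mem _ hc)) acc (o + 1) dts]
      simp [List.count_cons]
      all_goals omega
    · rw [List.foldl_cons, show stepB (acc, o, dts) x = (acc, o, dts + 1) from by
        simp [stepB, hx, hO]]
      rw [ih (fun c hc => h c (List.mem_cons_of_mem _ hc)) acc o (dts + 1)]
      simp [List.count_cons, hO]
      all_goals omega

theorem b_high (n : Nat) : ∀ (s : List Char), s.length ≤ n → ∀ (acc : List Char),
    (s.foldl stepB (acc, 0, 0)).1 ++
      (List.replicate (s.foldl stepB (acc, 0, 0)).2.1 'O' ++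
        List.replicate (s.foldl stepB (acc, 0, 0)).2.2 '.') = acc ++ refSpec s := by
  induction n with
  | zero =>
    intro s hlen acc
    have hs : s = [] := List.eq_nil_of_length_eq_zero (by omega)
    subst hs
    rw [refSpec_no_hash [] (by simp)]
    simp [fillSeg]
  | succ m ih =>
    intro s hlen acc
    have hnh : ∀ c ∈ s.takeWhile (· ≠ '#'), c ≠ '#' := by
      intro c hc
      simpa using List.mem_takeWhile_imp hc
    have hsplit : s.takeWhile (· ≠ '#') ++ s.dropWhile (· ≠ '#') = s :=
      List.takeWhile_append_dropWhile
    cases hw : s.dropWhile (· ≠ '#') with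
    | nil =>
      rw [hw, List.append_nil] at hsplit
      have hnh' : ∀ c ∈ s, c ≠ '#' := fun c hc => hnh c (by rw [hsplit]; exact hc)
      rw [b_fold_seg s hnh', refSpec_no_hash s hnh']
      simp [fillSeg]
    | cons ch t =>
      have hch : ch = '#' := by
        have hhd := List.head_dropWhile_not (fun x => decide (x ≠ '#')) (l := s)
        rw [hw] at hhd
        simpa using hhd (by simp)
      subst hch
      rw [hw] at hsplit
      have hlt : t.length ≤ m := by
        have h1 : s.length = (s.takeWhile (· ≠ '#')).length + (t.length + 1) := by
          conv_lhs => rw [← hsplit]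
          simp
        omega
      have hfold : List.foldl stepB (acc, 0, 0) s
          = List.foldl stepB (acc, 0, 0) (s.takeWhile (· ≠ '#') ++ '#' :: t) := by
        rw [hsplit]
      rw [hfold, List.foldl_append, b_fold_seg _ hnh, List.foldl_cons]
      rw [show stepB (acc, 0 + (s.takeWhile (· ≠ '#')).count 'O',
            0 + ((s.takeWhile (· ≠ '#')).length - (s.takeWhile (· ≠ '#')).count 'O')) '#'
          = (acc ++ (List.replicate ((s.takeWhile (· ≠ '#')).count 'O') 'O' ++
              List.replicate ((s.takeWhile (· ≠ '#')).length - (s.takeWhile (· ≠ '#')).count 'O') '.' ++ ['#']), 0, 0) from by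
        simp [stepB]]
      rw [ih t hlt]
      rw [show refSpec s = refSpec (s.takeWhile (· ≠ '#') ++ '#' :: t) from by rw [hsplit],
        refSpec_split _ t hnh]
      simp [fillSeg]

theorem b_eq_ref (rocks : String) : col_slide_alt rocks = String.ofList (refSpec rocks.toList) := by
  show String.ofList
      ((rocks.toList.foldl stepB ([], 0, 0)).1 ++
        (List.replicate (rocks.toList.foldl stepB ([], 0, 0)).2.1 'O' ++
          List.replicate (rocks.toList.foldl stepB ([], 0, 0)).2.2 '.'))
    = String.ofList (refSpec rocks.toList)
  rw [b_high rocks.toList.length rocks.toList le_rfl []]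
  simp

theorem a_eq_ref (rocks : String) : col_slide rocks = String.ofList (refSpec rocks.toList) := by
  show String.ofList
      (reconLoop (((PySem.List.pyRange (((rocks.toList.length : Int)) - 1) (-1) (-1)).foldl
        (fun st i => stepA st (PySem.List.pyGetD rocks.toList i ' ') i) (PySem.Dict.empty, 0)).1.insert (-1) ((PySem.List.pyRange (((rocks.toList.length : Int)) - 1) (-1) (-1)).foldl
        (fun st i => stepA st (PySem.List.pyGetD rocks.toList i ' ') i) (PySem.Dict.empty, 0)).2)
        (PySem.Set.ofList (((PySem.List.pyRange (((rocks.toList.length : Int)) - 1) (-1) (-1)).foldl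
        (fun st i => stepA st (PySem.List.pyGetD rocks.toList i ' ') i) (PySem.Dict.empty, 0)).1.insert (-1) ((PySem.List.pyRange (((rocks.toList.length : Int)) - 1) (-1) (-1)).foldl
        (fun st i => stepA st (PySem.List.pyGetD rocks.toList i ' ') i) (PySem.Dict.empty, 0)).2).keys)
        ((rocks.toList.length : Int)) (rocks.toList.length + 1)
        ((((PySem.List.pyRange (((rocks.toList.length : Int)) - 1) (-1) (-1)).foldl
        (fun st i => stepA st (PySem.List.pyGetD rocks.toList i ' ') i) (PySem.Dict.empty, 0)).1.insert (-1) ((PySem.List.pyRange (((rocks.toList.length : Int)) - 1) (-1) (-1)).foldl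
        (fun st i => stepA st (PySem.List.pyGetD rocks.toList i ' ') i) (PySem.Dict.empty, 0)).2).getD (-1) 0)
        (PySem.List.pyRepeat ['O'] ((((PySem.List.pyRange (((rocks.toList.length : Int)) - 1) (-1) (-1)).foldl
        (fun st i => stepA st (PySem.List.pyGetD rocks.toList i ' ') i) (PySem.Dict.empty, 0)).1.insert (-1) ((PySem.List.pyRange (((rocks.toList.length : Int)) - 1) (-1) (-1)).foldl
        (fun st i => stepA st (PySem.List.pyGetD rocks.toList i ' ') i) (PySem.Dict.empty, 0)).2).getD (-1) 0)))
    = String.ofList (refSpec rocks.toList)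
  rw [conv_scan]
  set l := rocks.toList with hl
  set d := (scanF l 0).1.insert (-1) (scanF l 0).2 with hd
  have hs0 : d.getD (-1) 0 = ((l.takeWhile (· ≠ '#')).count 'O' : Int) := by
    rw [hd, PySem.Dict.getD_insert_self, scan_snd]
  have Hd : ∀ i : Int, 0 ≤ i → d.get? i = dSpec l i := by
    intro i hi
    rw [hd, PySem.Dict.get?_insert_of_ne _ _ (by omega)]
    have h1 := scan_get l 0 i.toNat
    rw [show ((0 : Int) + (i.toNat : Int)) = i from by omega] at h1
    rw [h1]
    unfold dSpec
    by_cases h2 : i.toNat < l.length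
    · rw [dif_pos h2, dif_pos ⟨hi, h2⟩]
    · rw [dif_neg h2, dif_neg (by omega)]
  have Hrl : ∀ i : Int, 0 ≤ i →
      (PySem.Set.ofList d.keys).contains i = (d.get? i).isSome := by
    intro i _
    by_cases hmem : i ∈ d.keys
    · rw [show (PySem.Set.ofList d.keys).contains i = true from
        (PySem.Set.contains_iff _ _).mpr ((PySem.Set.mem_ofList _ _).mpr hmem)]
      have := (PySem.Dict.contains_iff_mem_keys d i).mpr hmem
      rw [PySem.Dict.contains_eq_isSome_get?] at this
      exact this.symm
    · have hc1 : (PySem.Set.ofList d.keys).contains i = false := by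
        by_contra hcc
        have : (PySem.Set.ofList d.keys).contains i = true := by
          cases hx : (PySem.Set.ofList d.keys).contains i
          · exact absurd hx hcc
          · rfl
        exact hmem ((PySem.Set.mem_ofList _ _).mp ((PySem.Set.contains_iff _ _).mp this))
      have hc2 : d.contains i = false := by
        cases hx : d.contains i
        · rfl
        · exact absurd ((PySem.Dict.contains_iff_mem_keys d i).mp hx) hmem
      rw [hc1, PySem.Dict.contains_eq_isSome_get?] at *
      exact hc2.symm
  have hrun := recon_loop_spec l d (PySem.Set.ofList d.keys) Hd Hrl
    (l.length + 1) (d.getD (-1) 0) (PySem.List.pyRepeat ['O'] (d.getD (-1) 0))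
    (by rw [hs0]; omega)
    (by rw [hs0]; omega)
  rw [hrun, hs0, PySem.List.pyRepeat_singleton]
  rw [show (((l.takeWhile (· ≠ '#')).count 'O' : Int)).toNat
      = (l.takeWhile (· ≠ '#')).count 'O' from by omega]
  rw [a_high l]


-- ===== VERDICT (by name: the statement is the Claim_ definition above) =====
theorem col_slide_spec : Claim_equal_col_slide := by
  intro rocks _
  unfold Spec_col_slide
  rw [a_eq_ref, b_eq_ref]
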